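-- pv_equiv track=rewrite | github.com/EEDK/StudyBaekJoon | 백준/Silver/10815. 숫자 카드/숫자 카드.py | solution
-- ===== SOURCE A (Python) =====
-- def solution(sangGen, numCard):
--     answer = []
--
--     dict = {}
--     for card in sangGen:
--         try:
--             dict[card] += 1
--         except:
--             dict[card] = 1
--
--     for card in numCard:
--         try:
--             if dict[card]:
--                 answer.append(1)
--         except:
--             answer.append(0)
--
--     return answer
-- ===== SOURCE B (Python) =====
-- def _bisect_left(s, x):
--     lo, hi = 0, len(s)
--     while lo < hi:
--         mid = (lo + hi) // 2
--         if s[mid] < x: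
--             lo = mid + 1
--         else:
--             hi = mid
--     return lo
--
--
-- def solution(sangGen, numCard):
--     s = sorted(sangGen)
--     n = len(s)
--     answer = []
--     for card in numCard:
--         i = _bisect_left(s, card)
--         answer.append(1 if i < n and s[i] == card else 0)
--     return answer
-- ===== Notes on version B (the rewrite author's own statement) =====
-- stated objective: alternative
-- what changed: Replaces the try/except counter dict and hash lookups with a sorted copy of sangGen plus a hand-written binary search (bisect_left) per query.
import Mathlib
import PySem

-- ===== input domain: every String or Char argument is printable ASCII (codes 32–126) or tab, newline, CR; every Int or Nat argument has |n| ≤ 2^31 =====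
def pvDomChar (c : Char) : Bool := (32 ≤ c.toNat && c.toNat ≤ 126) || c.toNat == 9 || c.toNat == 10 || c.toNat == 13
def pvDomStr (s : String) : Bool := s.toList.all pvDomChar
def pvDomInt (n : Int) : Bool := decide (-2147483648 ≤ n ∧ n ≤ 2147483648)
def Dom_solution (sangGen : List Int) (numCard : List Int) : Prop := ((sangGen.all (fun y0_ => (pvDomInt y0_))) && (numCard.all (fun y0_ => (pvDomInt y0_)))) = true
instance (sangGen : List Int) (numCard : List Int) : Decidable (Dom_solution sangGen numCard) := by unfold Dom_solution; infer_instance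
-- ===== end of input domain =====

-- B replaces A's try/except counter dict with a sorted copy plus binary search per query (alternative algorithm, same results).

-- ===== PORT A =====
-- for card in sangGen: try dict[card] += 1 except dict[card] = 1
def pvBuild (sangGen : List Int) : PySem.Dict Int Int :=
  sangGen.foldl (fun d card =>
    match d.get? card with
    | some v => d.insert card (v + 1)   -- dict[card] += 1 succeeded
    | none   => d.insert card 1)        -- KeyError → dict[card] = 1
    PySem.Dict.empty

def solution (sangGen : List Int) (numCard : List Int) : List Int :=
  let d := pvBuild sangGen
  numCard.foldl (fun answer card =>
    match d.get? card with
    | some v => if v ≠ 0 then answer ++ [1] else answer   -- if dict[card]: answer.append(1)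
    | none   => answer ++ [0])                            -- KeyError → answer.append(0)
    []

-- ===== PORT B =====
-- _bisect_left's while loop, with the remaining iteration count as fuel (hi - lo shrinks each turn)
def pvBL (s : List Int) (x : Int) : Nat → Nat → Nat → Nat
  | 0, lo, _ => lo
  | fuel + 1, lo, hi =>
    if lo < hi then
      match s[(lo + hi) / 2]? with     -- s[mid]; always in range when hi ≤ len s
      | some y => if y < x then pvBL s x fuel ((lo + hi) / 2 + 1) hi else pvBL s x fuel lo ((lo + hi) / 2)
      | none => lo
    else lo

def solution_alt (sangGen : List Int) (numCard : List Int) : List Int :=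
  let s := PySem.List.sorted sangGen (fun x => x) false
  let n := s.length
  numCard.foldl (fun answer card =>
    let i := pvBL s card n 0 n
    answer ++ [if i < n ∧ s.getD i 0 = card then 1 else 0]) []

-- ===== PRECONDITION & SPEC =====
def Spec_solution (sangGen : List Int) (numCard : List Int) (out : List Int) : Prop := out = solution_alt sangGen numCard
instance (sangGen : List Int) (numCard : List Int) (out : List Int) : Decidable (Spec_solution sangGen numCard out) := by unfold Spec_solution; infer_instance

-- ===== CLAIM (what is proved, stated in full; the proofs are below) =====
def Claim_equal_solution : Prop := ∀ (sangGen : List Int) (numCard : List Int), Dom_solution sangGen numCard → Spec_solution sangGen numCard (solution sangGen numCard)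

-- ===== LEMMAS AND PROOFS =====

theorem pvBuild_eq_counter (sangGen : List Int) : pvBuild sangGen = PySem.Dict.counter sangGen := by
  rw [← PySem.Dict.foldl_insert_getD_add_one_eq_counter]
  unfold pvBuild
  have hstep : (fun (d : PySem.Dict Int Int) (card : Int) =>
      match d.get? card with
      | some v => d.insert card (v + 1)
      | none => d.insert card 1) = fun d x => d.insert x (d.getD x 0 + 1) := by
    funext d card
    simp only [PySem.Dict.getD]
    cases d.get? card with
    | none => simp
    | some v => simp
  rw [hstep]

theorem foldl_push (g : Int → Int) (cs : List Int) (acc : List Int) :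
    cs.foldl (fun a c => a ++ [g c]) acc = acc ++ cs.map g := by
  induction cs generalizing acc with
  | nil => simp
  | cons c cs ih => simp [ih]

theorem counter_get?_mem (sangGen : List Int) (c : Int) (hc : c ∈ sangGen) :
    ∃ v, (PySem.Dict.counter sangGen).get? c = some v ∧ v ≠ 0 := by
  have hcontains : (PySem.Dict.counter sangGen).contains c = true := by
    rw [PySem.Dict.contains_counter]; simpa using hc
  have hgd : (PySem.Dict.counter sangGen).getD c 0 = (sangGen.count c : Int) :=
    PySem.Dict.getD_counter sangGen c
  cases hg : (PySem.Dict.counter sangGen).get? c with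
  | none =>
    exfalso
    have := (PySem.Dict.get?_eq_none_iff_contains (d := PySem.Dict.counter sangGen) (k := c)).mp hg
    rw [hcontains] at this; exact absurd this (by simp)
  | some v =>
    refine ⟨v, rfl, ?_⟩
    have hv : v = (sangGen.count c : Int) := by rw [← hgd]; simp [PySem.Dict.getD, hg]
    have : 0 < sangGen.count c := List.count_pos_iff.mpr hc
    omega

theorem counter_get?_not_mem (sangGen : List Int) (c : Int) (hc : c ∉ sangGen) :
    (PySem.Dict.counter sangGen).get? c = none := by
  rw [PySem.Dict.get?_eq_none_iff_contains, PySem.Dict.contains_counter]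
  simpa using hc

theorem solution_eq_map (sangGen numCard : List Int) :
    solution sangGen numCard = numCard.map (fun c => if c ∈ sangGen then 1 else 0) := by
  have hstep : (fun (answer : List Int) (card : Int) =>
      match (pvBuild sangGen).get? card with
      | some v => if v ≠ 0 then answer ++ [1] else answer
      | none => answer ++ [0]) = fun a c => a ++ [if c ∈ sangGen then (1 : Int) else 0] := by
    funext a c
    rw [pvBuild_eq_counter]
    by_cases hc : c ∈ sangGen
    · obtain ⟨v, hg, hv⟩ := counter_get?_mem sangGen c hc
      simp [hg, hv, hc]
    · simp [counter_get?_not_mem sangGen c hc, hc]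
  show numCard.foldl (fun (answer : List Int) (card : Int) =>
      match (pvBuild sangGen).get? card with
      | some v => if v ≠ 0 then answer ++ [1] else answer
      | none => answer ++ [0]) [] = _
  rw [hstep, foldl_push]
  simp

theorem pvBL_eq_loop (s : List Int) (x : Int) (fuel lo hi : Nat) :
    pvBL s x fuel lo hi = PySem.List.bisectLeftLoop s x fuel lo hi := by
  induction fuel generalizing lo hi with
  | zero => simp [pvBL, PySem.List.bisectLeftLoop]
  | succ n ih =>
    simp only [pvBL, PySem.List.bisectLeftLoop]
    split
    · cases s[(lo + hi) / 2]? with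
      | none => rfl
      | some y => by_cases hy : y < x <;> simp [hy, ih]
    · rfl

theorem bisect_found_iff (s : List Int) (c : Int) (hs : s.Pairwise (· ≤ ·)) :
    (PySem.List.bisectLeft s c < s.length ∧ s.getD (PySem.List.bisectLeft s c) 0 = c) ↔ c ∈ s := by
  obtain ⟨hle, hlt, hge⟩ := PySem.List.bisectLeft_spec s c hs
  set i := PySem.List.bisectLeft s c with hi
  constructor
  · rintro ⟨h1, h2⟩
    rw [List.getD_eq_getElem s 0 h1] at h2
    rw [← h2]; exact List.getElem_mem h1
  · intro hc
    obtain ⟨j, hj, hjc⟩ := List.mem_iff_getElem.mp hc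
    have hij : i ≤ j := by
      by_contra h
      have := hlt j hj (by omega)
      omega
    have h1 : i < s.length := lt_of_le_of_lt hij hj
    refine ⟨h1, ?_⟩
    rw [List.getD_eq_getElem s 0 h1]
    have hxle : c ≤ s[i] := hge i h1 (le_refl i)
    have hmono : s[i] ≤ s[j] := by
      rcases eq_or_lt_of_le hij with h | h
      · simp [h]
      · exact List.Pairwise.rel_get_of_lt (by simpa using hs) (by simpa using h)
    omega

theorem solution_alt_eq_map (sangGen numCard : List Int) :
    solution_alt sangGen numCard = numCard.map (fun c => if c ∈ sangGen then 1 else 0) := by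
  have hs : (PySem.List.sorted sangGen (fun x => x) false).Pairwise (· ≤ ·) := by
    have := PySem.List.sorted_pairwise (xs := sangGen) (key := fun x => x)
    simpa using this
  have h : solution_alt sangGen numCard = [] ++ numCard.map (fun c =>
      if pvBL (PySem.List.sorted sangGen (fun x => x) false) c
            (PySem.List.sorted sangGen (fun x => x) false).length 0
            (PySem.List.sorted sangGen (fun x => x) false).length <
            (PySem.List.sorted sangGen (fun x => x) false).length ∧
          (PySem.List.sorted sangGen (fun x => x) false).getD
            (pvBL (PySem.List.sorted sangGen (fun x => x) false) c
              (PySem.List.sorted sangGen (fun x => x) false).length 0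
              (PySem.List.sorted sangGen (fun x => x) false).length) 0 = c
        then (1 : Int) else 0) :=
    foldl_push _ numCard []
  rw [h, List.nil_append]
  apply List.map_congr_left
  intro c _
  have he : pvBL (PySem.List.sorted sangGen (fun x => x) false) c
      (PySem.List.sorted sangGen (fun x => x) false).length 0
      (PySem.List.sorted sangGen (fun x => x) false).length
      = PySem.List.bisectLeft (PySem.List.sorted sangGen (fun x => x) false) c := by
    rw [pvBL_eq_loop]; rfl
  rw [he]
  have hiff := bisect_found_iff (PySem.List.sorted sangGen (fun x => x) false) c hs
  rw [PySem.List.mem_sorted] at hiff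
  by_cases hc : c ∈ sangGen
  · rw [if_pos (hiff.mpr hc), if_pos hc]
  · have hno : ¬ _ := fun hh => hc (hiff.mp hh)
    rw [if_neg hno, if_neg hc]

-- ===== VERDICT (by name: the statement is the Claim_ definition above) =====
theorem solution_spec : Claim_equal_solution := by
  intro sangGen numCard _
  show solution sangGen numCard = solution_alt sangGen numCard
  rw [solution_eq_map, solution_alt_eq_map]
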